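-- pv_equiv track=rewrite | github.com/jjhw0106/Deep-Lunch-Paul | algorithm/프로그래머스/과일 장수.py | solution
-- ===== SOURCE A (Python) =====
-- def solution(k, m, score):
--     answer = 0
--     sell = []
--     # 정렬
--     # 큰거부터 set구성
--     score.sort()
--
--     while len(score) >= m:
--         for i in range(m):
--             sell.append(score.pop())
--             if len(sell) == m:
--                 answer = answer + (min(sell) * m)
--                 sell = []
--
--
--     return answer
-- ===== SOURCE B (Python) =====
-- def solution(k, m, score):
--     # sort once (descending); group g of the m best fruits has its minimum at
--     # index g*m + m - 1, so the answer is m times the sum of those entries.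
--     s = sorted(score, reverse=True)
--     q = len(s) // m
--     return m * sum(s[g * m + m - 1] for g in range(q))
-- ===== Notes on version B (the rewrite author's own statement) =====
-- stated objective: simpler
-- what changed: A pops elements one by one in a Python while/for loop with a running 'sell' buffer and per-group min(); B sorts once descending and directly sums the group minima s[g*m+m-1] over the full groups, with no mutation, buffer or inner loop.
import Mathlib
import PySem

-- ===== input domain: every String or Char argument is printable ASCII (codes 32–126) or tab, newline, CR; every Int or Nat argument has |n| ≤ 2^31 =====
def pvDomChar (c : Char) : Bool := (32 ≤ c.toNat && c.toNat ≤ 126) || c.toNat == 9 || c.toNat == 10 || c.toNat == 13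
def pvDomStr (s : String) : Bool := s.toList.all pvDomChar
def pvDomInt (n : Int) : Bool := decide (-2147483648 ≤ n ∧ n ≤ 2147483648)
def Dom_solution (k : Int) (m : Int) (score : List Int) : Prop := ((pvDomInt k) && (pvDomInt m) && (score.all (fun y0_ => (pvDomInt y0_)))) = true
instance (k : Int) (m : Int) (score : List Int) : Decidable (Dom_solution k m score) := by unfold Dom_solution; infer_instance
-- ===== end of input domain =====

-- B replaces A's destructive pop/buffer while-loop by one descending sort plus a strided
-- sum of the group minima (simpler, no mutation); A sorts and empties the caller's list
-- in place, so the equivalence proved here is about the return value only.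


-- ===== PORT A =====
-- body of A's inner `for i in range(m)`: sell.append(score.pop()); flush when len(sell)==m
def solInnerStep (m : Int) (st : List Int × List Int × Int) (_i : Int) : List Int × List Int × Int :=
  match PySem.List.pop? st.1 (-1) with
  | none => st   -- score.pop() on the empty list (IndexError); unreachable under the while-guard
  | some (x, score') =>
    let sell := st.2.1 ++ [x]
    if (sell.length : Int) = m then
      (score', [], st.2.2 + ((PySem.List.min? sell (fun y => y)).getD 0) * m)
    else (score', sell, st.2.2)

-- A's `while len(score) >= m` loop; each iteration removes m ≥ 1 elements, so
-- fuel = score.length + 1 is enough under Pre_ (m ≤ 0 makes the Python loop spin forever).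
def solWhile (m : Int) : Nat → List Int → List Int → Int → Int
  | 0, _, _, answer => answer
  | fuel+1, score, sell, answer =>
    if m ≤ (score.length : Int) then
      let st := (PySem.List.pyRange 0 m 1).foldl (solInnerStep m) (score, sell, answer)
      solWhile m fuel st.1 st.2.1 st.2.2
    else answer

def solution (k : Int) (m : Int) (score : List Int) : Int :=
  solWhile m (score.length + 1) (PySem.List.sorted score (fun y => y)) [] 0

-- ===== PORT B =====
def solution_alt (k : Int) (m : Int) (score : List Int) : Int :=
  let s := PySem.List.sorted score (fun y => y) true
  let q := PySem.Int.floordiv (s.length : Int) m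
  m * ((PySem.List.pyRange 0 q 1).foldl
        (fun acc g => acc + PySem.List.pyGetD s (g * m + m - 1) 0) 0)

-- ===== PRECONDITION & SPEC =====
-- Pre_ excludes m ≤ 0, where Python A never returns: `while len(score) >= m` then never terminates.
def Pre_solution (k : Int) (m : Int) (score : List Int) : Prop := 1 ≤ m
instance (k : Int) (m : Int) (score : List Int) : Decidable (Pre_solution k m score) := by unfold Pre_solution; infer_instance
def pvWitness_solution : Int × Int × List Int := (4, 2, [4, 1, 2, 4, 2, 1])

def Spec_solution (k : Int) (m : Int) (score : List Int) (out : Int) : Prop := out = solution_alt k m score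
instance (k : Int) (m : Int) (score : List Int) (out : Int) : Decidable (Spec_solution k m score out) := by unfold Spec_solution; infer_instance

-- ===== CLAIM (what is proved, stated in full; the proofs are below) =====
def Claim_equal_solution : Prop := ∀ (k : Int) (m : Int) (score : List Int), Dom_solution k m score → Pre_solution k m score → Spec_solution k m score (solution k m score)

-- ===== LEMMAS AND PROOFS =====

-- B's inner sum, on a (descending) list t; `solution_alt k m score = m * Bsum m (sorted desc)` by rfl
def Bsum (m : Int) (t : List Int) : Int :=
  (PySem.List.pyRange 0 (PySem.Int.floordiv (t.length : Int) m) 1).foldl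
    (fun acc g => acc + PySem.List.pyGetD t (g * m + m - 1) 0) 0

theorem foldl_add_f {α : Type} (f : α → Int) : ∀ (l : List α) (i : Int),
    l.foldl (fun a x => a + f x) i = i + l.foldl (fun a x => a + f x) 0 := by
  intro l
  induction l with
  | nil => intro i; simp
  | cons x t ih =>
    intro i
    simp only [List.foldl_cons]
    rw [ih (i + f x), ih (0 + f x)]
    ring

theorem foldl_congr_f {α : Type} (f g : α → Int) : ∀ (l : List α) (i : Int), (∀ x ∈ l, f x = g x) →
    l.foldl (fun a x => a + f x) i = l.foldl (fun a x => a + g x) i := by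
  intro l
  induction l with
  | nil => intro i _; rfl
  | cons x t ih =>
    intro i h
    simp only [List.foldl_cons]
    rw [h x (by simp), ih _ (fun y hy => h y (List.mem_cons_of_mem _ hy))]

theorem foldl_inner_iterate (m : Int) : ∀ (l : List Int) (st : List Int × List Int × Int),
    l.foldl (solInnerStep m) st = (fun s => solInnerStep m s 0)^[l.length] st := by
  intro l
  induction l with
  | nil => intro st; rfl
  | cons x t ih =>
    intro st
    simp only [List.foldl_cons, List.length_cons, Function.iterate_succ_apply]
    rw [ih]
    rfl

theorem iter_pop (m : Int) (hm : 1 ≤ m) (u : List Int) (a : Int) :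
    ∀ (v sell : List Int), v ≠ [] → sell.length + v.length = m.toNat →
    (fun s => solInnerStep m s 0)^[v.length] (u ++ v, sell, a)
      = (u, [], a + ((PySem.List.min? (sell ++ v.reverse) (fun y => y)).getD 0) * m) := by
  intro v
  induction v using List.reverseRecOn with
  | nil => intro sell h _; exact absurd rfl h
  | append_singleton w x ih =>
    intro sell _ hlen
    have hlw : (w ++ [x]).length = w.length + 1 := by simp
    rw [hlw, Function.iterate_succ_apply]
    have hpop : PySem.List.pop? (u ++ w ++ [x]) (-1) = some (x, u ++ w) :=
      PySem.List.pop?_last (u ++ w) x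
    have hstep : solInnerStep m (u ++ (w ++ [x]), sell, a) 0
        = (if ((sell ++ [x]).length : Int) = m then
            (u ++ w, [], a + ((PySem.List.min? (sell ++ [x]) (fun y => y)).getD 0) * m)
          else (u ++ w, sell ++ [x], a)) := by
      simp only [solInnerStep, ← List.append_assoc, hpop]
    rw [hstep]
    rcases w with _ | ⟨y, w'⟩
    · have hc : ((sell ++ [x]).length : Int) = m := by
        simp at hlen ⊢; omega
      rw [if_pos hc]
      simp
    · have hc : ¬ ((sell ++ [x]).length : Int) = m := by
        simp at hlen ⊢; omega
      rw [if_neg hc]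
      have := ih (sell ++ [x]) (by simp) (by simp at hlen ⊢; omega)
      simp only [List.length_cons] at this ⊢
      rw [this]
      simp [List.reverse_append]

theorem inner_fold (m : Int) (hm : 1 ≤ m) (u v : List Int) (hv : v.length = m.toNat)
    (a : Int) :
    (PySem.List.pyRange 0 m 1).foldl (solInnerStep m) (u ++ v, [], a)
      = (u, [], a + ((PySem.List.min? v.reverse (fun y => y)).getD 0) * m) := by
  have hne : v ≠ [] := by
    intro h; rw [h] at hv; simp at hv; omega
  have hl : (PySem.List.pyRange 0 m 1).length = v.length := by
    rw [PySem.List.length_pyRange_one]; omega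
  rw [foldl_inner_iterate, hl, iter_pop m hm u a v [] hne (by simpa using hv)]
  simp

theorem min_sorted_head (h : Int) (t : List Int) (hp : (h :: t).Pairwise (· ≤ ·)) :
    (PySem.List.min? ((h :: t).reverse) (fun y => y)).getD 0 = h := by
  cases hmin : PySem.List.min? ((h :: t).reverse) (fun y => y) with
  | none =>
    rw [PySem.List.min?_eq_none_iff] at hmin
    simp at hmin
  | some mv =>
    have hmem := PySem.List.min?_mem hmin
    rw [List.mem_reverse] at hmem
    have h1 : mv ≤ h := PySem.List.min?_isMin hmin h (by simp)
    have h2 : h ≤ mv := by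
      rcases List.mem_cons.mp hmem with rfl | hmem'
      · exact le_refl _
      · exact (List.pairwise_cons.mp hp).1 mv hmem'
    simp
    omega

theorem Bsum_step (m : Int) (hm : 1 ≤ m) (t : List Int) (hlen : m ≤ (t.length : Int)) :
    Bsum m t = PySem.List.pyGetD t (m - 1) 0 + Bsum m (t.drop m.toNat) := by
  have hm0 : 0 < m := by omega
  have hdl : ((t.drop m.toNat).length : Int) = (t.length : Int) - m := by
    simp [List.length_drop]; omega
  have hq : PySem.Int.floordiv (t.length : Int) m = (t.length : Int) / m :=
    PySem.Int.floordiv_eq_ediv_of_pos hm0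
  have hq' : PySem.Int.floordiv ((t.drop m.toNat).length : Int) m = (t.length : Int) / m - 1 := by
    rw [PySem.Int.floordiv_eq_ediv_of_pos hm0, hdl]
    have : (t.length : Int) - m = (t.length : Int) + (-1) * m := by ring
    rw [this, Int.add_mul_ediv_right _ _ (by omega : m ≠ 0)]
    ring
  set q : Int := (t.length : Int) / m with hqdef
  have hq1 : 1 ≤ q := by
    rw [hqdef, Int.le_ediv_iff_mul_le hm0]; omega
  have hqm : q * m ≤ (t.length : Int) := by
    have hmod := Int.emod_nonneg (t.length : Int) (by omega : m ≠ 0)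
    have hid := Int.mul_ediv_add_emod (t.length : Int) m
    have hqm' : q * m = m * ((t.length : Int) / m) := by rw [hqdef]; ring
    linarith
  unfold Bsum
  rw [hq, hq']
  rw [PySem.List.pyRange_one_cons (by omega : (0:Int) < q)]
  simp only [List.foldl_cons]
  rw [foldl_add_f]
  rw [PySem.List.pyRange_one (0 + 1) q, PySem.List.pyRange_one 0 (q - 1)]
  have hrng : (q - (0 + 1)).toNat = (q - 1 - 0).toNat := by omega
  rw [hrng]
  rw [List.foldl_map, List.foldl_map]
  rw [foldl_congr_f
    (fun k : Nat => PySem.List.pyGetD t (((0:Int) + 1 + k) * m + m - 1) 0)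
    (fun k : Nat => PySem.List.pyGetD (t.drop m.toNat) (((0:Int) + k) * m + m - 1) 0)
    (List.range (q - 1 - 0).toNat) 0 ?_]
  · have h0 : ((0:Int) * m + m - 1) = m - 1 := by ring
    rw [h0]; ring
  · intro k hk
    beta_reduce
    rw [List.mem_range] at hk
    have hk' : (k : Int) < q - 1 := by omega
    have hkm : 0 ≤ (k : Int) * m := mul_nonneg (by omega) (by omega)
    have hkb : ((k : Int) + 2) * m ≤ q * m :=
      mul_le_mul_of_nonneg_right (by omega) (by omega)
    have hi1 : ((0:Int) + 1 + k) * m + m - 1 = (k : Int) * m + 2 * m - 1 := by ring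
    have hi0 : ((0:Int) + k) * m + m - 1 = (k : Int) * m + m - 1 := by ring
    rw [hi1, hi0]
    have hb2 : (k : Int) * m + 2 * m - 1 < (t.length : Int) := by nlinarith
    rw [PySem.List.pyGetD_eq_getElem t 0 (by omega) (by omega)]
    rw [PySem.List.pyGetD_eq_getElem (t.drop m.toNat) 0 (by omega)
      (by rw [hdl]; omega)]
    rw [List.getElem_drop]
    congr 1
    omega

theorem while_char (m : Int) (hm : 1 ≤ m) : ∀ (fuel : Nat) (s : List Int) (a : Int),
    s.Pairwise (· ≤ ·) → s.length < fuel →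
    solWhile m fuel s [] a = a + m * Bsum m s.reverse := by
  intro fuel
  induction fuel with
  | zero => intro s a _ h; omega
  | succ fuel ih =>
    intro s a hp hlen
    by_cases hge : m ≤ (s.length : Int)
    · have hmn : m.toNat ≤ s.length := by omega
      obtain ⟨vh, vt, hv'⟩ : ∃ vh vt, s.drop (s.length - m.toNat) = vh :: vt := by
        cases h : s.drop (s.length - m.toNat) with
        | nil =>
          exfalso
          have := congrArg List.length h
          simp [List.length_drop] at this
          omega
        | cons a b => exact ⟨a, b, rfl⟩
      set u := s.take (s.length - m.toNat) with hu
      have hs : s = u ++ (vh :: vt) := by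
        rw [hu, ← hv']; exact (List.take_append_drop _ _).symm
      have hvlen : (vh :: vt).length = m.toNat := by
        rw [← hv']; simp [List.length_drop]; omega
      have hvp : (vh :: vt).Pairwise (· ≤ ·) := hv' ▸ hp.sublist (List.drop_sublist _ _)
      have hmin := min_sorted_head vh vt hvp
      have hfold : (PySem.List.pyRange 0 m 1).foldl (solInnerStep m) (s, [], a)
          = (u, [], a + vh * m) := by
        rw [show s = u ++ (vh :: vt) from hs, inner_fold m hm u (vh :: vt) hvlen a, hmin]
      rw [solWhile, if_pos hge, hfold]
      have hup : u.Pairwise (· ≤ ·) := hp.sublist (List.take_sublist _ _)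
      have hulen : u.length < fuel := by
        rw [hu]; simp [List.length_take]; omega
      rw [ih u (a + vh * m) hup hulen]
      have hrev : s.reverse = (vh :: vt).reverse ++ u.reverse := by
        rw [hs, List.reverse_append]
      have hdrop : s.reverse.drop m.toNat = u.reverse := by
        rw [hrev, ← show ((vh :: vt).reverse).length = m.toNat from by simpa using hvlen]
        exact List.drop_left
      have hget : PySem.List.pyGetD s.reverse (m - 1) 0 = vh := by
        rw [hrev]
        have hix : (m - 1).toNat < (vh :: vt).reverse.length := by
          simp only [List.length_reverse] at *
          simp at hvlen ⊢
          omega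
        rw [PySem.List.pyGetD_eq_getElem _ 0 (by omega)
          (by simp only [List.length_append, List.length_reverse] at *; push_cast; omega)]
        rw [List.getElem_append_left hix, List.getElem_reverse]
        have h0 : (vh :: vt).length - 1 - (m - 1).toNat = 0 := by
          simp at hvlen ⊢; omega
        simp only [h0]
        simp
      rw [Bsum_step m hm s.reverse (by simp; omega), hget, hdrop]
      ring
    · rw [solWhile, if_neg hge]
      have hq0 : PySem.Int.floordiv ((s.reverse.length : Nat) : Int) m = 0 := by
        rw [PySem.Int.floordiv_eq_ediv_of_pos (by omega : (0:Int) < m)]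
        apply Int.ediv_eq_zero_of_lt (by omega)
        simp; omega
      unfold Bsum
      rw [hq0, PySem.List.pyRange_one_eq_nil (by omega)]
      simp

theorem sorted_rev_eq_reverse_sorted (score : List Int) :
    PySem.List.sorted score (fun y => y) true = (PySem.List.sorted score (fun y => y)).reverse := by
  apply List.Perm.eq_of_pairwise (le := fun a b : Int => b ≤ a)
  · intro a b _ _ h1 h2; omega
  · exact PySem.List.sorted_pairwise_rev score (fun y => y)
  · rw [List.pairwise_reverse]
    exact PySem.List.sorted_pairwise score (fun y => y)
  · exact (PySem.List.sorted_perm score (fun y => y) true).trans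
      ((PySem.List.sorted_perm score (fun y => y) false).symm.trans
        (List.reverse_perm _).symm)

-- ===== VERDICT (by name: the statement is the Claim_ definition above) =====
theorem solution_spec : Claim_equal_solution := by
  intro k m score _dom hpre
  have hm : 1 ≤ m := hpre
  unfold Spec_solution solution solution_alt
  set ss := PySem.List.sorted score (fun y => y) with hss
  have hlen : ss.length = score.length := PySem.List.length_sorted score (fun y => y) false
  have hp : ss.Pairwise (· ≤ ·) := PySem.List.sorted_pairwise score (fun y => y)
  rw [while_char m hm (score.length + 1) ss 0 hp (by omega)]
  rw [sorted_rev_eq_reverse_sorted score]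
  simp only [← hss]
  unfold Bsum
  simp
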